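-- pv_equiv track=rewrite | github.com/edasu/Daily-Python | dog challenge/dog_challenge_codility_.py | solution
-- ===== SOURCE A (Python) =====
-- def solution(P, T, A, B):
--     # write your code in Python 3.6
--     N = len(P) #number of participant
--
--     connectedp = [[] for _ in range(N)] #define conectted components
--     for a, b in zip(A, B):
--         connectedp[a].append(b)
--         connectedp[b].append(a)
--     visit = [False] * N
--
--     for i in range(N):
--         if not visit[i]:
--             visit[i] = True
--             q = [i] #list of partisipants that are in the same connected component
--             sumvalue = 0
--             while q:
--                 v = q.pop() #take any P from list and removed from list
--                 sumvalue += P[v] - T[v]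
--                 for a in connectedp[v]:
--                     if not visit[a]: #if P not visited before
--                         visit[a] = True
--                         q.append(a)   #put in a list
--
--             if sumvalue != 0:
--                 return False
--     return True
-- ===== SOURCE B (Python) =====
-- def solution(P, T, A, B):
--     # Label-merging re-implementation: maintain a component label per node,
--     # merge the two labels of each edge's endpoints, then accumulate P-T per label.
--     n = len(P)
--     comp = list(range(n))
--     for a, b in zip(A, B):
--         ca, cb = comp[a], comp[b]
--         if ca != cb:
--             comp = [ca if c == cb else c for c in comp]
--     sums = {}
--     for v in range(n):
--         c = comp[v]
--         sums[c] = sums.get(c, 0) + P[v] - T[v]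
--     return all(s == 0 for s in sums.values())
-- ===== Notes on version B (the rewrite author's own statement) =====
-- stated objective: simpler
-- what changed: Replaces the adjacency-list + explicit-stack flood fill (with early return) by label merging: every node carries a component label, each edge merges the two labels of its endpoints by one relabel pass, then P-T is accumulated per label in a dict and all sums are checked for zero.
-- outside the precondition, e.g. on solution([1, 5], [0], [], []): A returns False, B raises IndexError; on solution([1, -1], [0, 0, 5], [-1], [0]): A returns False, B returns True
import Mathlib
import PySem

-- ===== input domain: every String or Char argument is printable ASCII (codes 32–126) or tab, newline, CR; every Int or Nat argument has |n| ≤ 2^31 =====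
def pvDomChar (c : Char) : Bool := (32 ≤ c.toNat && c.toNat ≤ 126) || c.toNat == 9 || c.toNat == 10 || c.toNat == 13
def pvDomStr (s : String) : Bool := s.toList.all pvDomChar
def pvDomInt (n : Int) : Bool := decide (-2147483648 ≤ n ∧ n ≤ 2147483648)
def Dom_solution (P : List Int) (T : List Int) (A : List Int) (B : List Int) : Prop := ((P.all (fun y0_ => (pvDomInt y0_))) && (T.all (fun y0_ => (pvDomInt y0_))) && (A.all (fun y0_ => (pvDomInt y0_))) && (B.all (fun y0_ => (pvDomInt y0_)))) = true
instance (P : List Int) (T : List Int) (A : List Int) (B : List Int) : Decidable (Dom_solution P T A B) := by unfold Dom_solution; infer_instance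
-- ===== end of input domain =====

-- B replaces A's adjacency-list + explicit-stack flood fill by per-node component-label
-- merging followed by one dict accumulation pass (objective: simpler).

-- ===== PORT A =====
-- A-side helpers: the adjacency build, the neighbour-pushing inner for-loop, the while-loop
-- (with a fuel bound that merely makes the recursion total; inside Pre_ it is never exhausted),
-- and the outer for-loop with its early return.
def pvBuildAdj (ab : List (Int × Int)) (adj0 : List (List Int)) : List (List Int) :=
  ab.foldl (fun cp p =>
    let cp1 := PySem.List.pySetD cp p.1 (PySem.List.pyGetD cp p.1 [] ++ [p.2])
    PySem.List.pySetD cp1 p.2 (PySem.List.pyGetD cp1 p.2 [] ++ [p.1])) adj0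

def pvPushNbrs (visit : List Bool) (q : List Int) (nbrs : List Int) : List Bool × List Int :=
  nbrs.foldl (fun s a =>
    if PySem.List.pyGetD s.1 a false then s
    else (PySem.List.pySetD s.1 a true, s.2 ++ [a])) (visit, q)

def pvDfs (P T : List Int) (adj : List (List Int)) :
    Nat → List Bool → List Int → Int → List Bool × Int
  | _, visit, [], s => (visit, s)
  | 0, visit, _ :: _, s => (visit, s)
  | fuel + 1, visit, a :: t, s =>
    let v := (a :: t).getLast (List.cons_ne_nil a t)
    let q1 := (a :: t).dropLast
    let s1 := s + PySem.List.pyGetD P v 0 - PySem.List.pyGetD T v 0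
    let vq := pvPushNbrs visit q1 (PySem.List.pyGetD adj v [])
    pvDfs P T adj fuel vq.1 vq.2 s1

def pvOuter (P T : List Int) (adj : List (List Int)) : List Int → List Bool → Bool
  | [], _ => true
  | i :: rest, visit =>
    if PySem.List.pyGetD visit i false then pvOuter P T adj rest visit
    else
      let visit1 := PySem.List.pySetD visit i true
      let r := pvDfs P T adj (2 * P.length + 1) visit1 [i] 0
      if r.2 ≠ 0 then false else pvOuter P T adj rest r.1

def solution (P : List Int) (T : List Int) (A : List Int) (B : List Int) : Bool :=
  let N := P.length
  let adj := pvBuildAdj (A.zip B) (List.replicate N [])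
  pvOuter P T adj (PySem.List.pyRange 0 N 1) (List.replicate N false)

-- ===== PORT B =====
def solution_alt (P : List Int) (T : List Int) (A : List Int) (B : List Int) : Bool :=
  let n := P.length
  let comp := (A.zip B).foldl (fun comp p =>
      let ca := PySem.List.pyGetD comp p.1 0
      let cb := PySem.List.pyGetD comp p.2 0
      if ca ≠ cb then comp.map (fun c => if c = cb then ca else c) else comp)
    (PySem.List.pyRange 0 n 1)
  let sums := (PySem.List.pyRange 0 n 1).foldl (fun d v =>
      let c := PySem.List.pyGetD comp v 0
      d.insert c (d.getD c 0 + PySem.List.pyGetD P v 0 - PySem.List.pyGetD T v 0))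
    PySem.Dict.empty
  sums.values.all (fun s => s == 0)

-- ===== PRECONDITION & SPEC =====
-- Pre_ excludes inputs where T is shorter than P (both programs hit a missing T[v]; A can
-- still return False early, B raises IndexError), edge endpoints outside [-len(P), len(P))
-- (both raise IndexError), and negative endpoints combined with a T strictly longer than P
-- (there A's negative indexing reads T entries beyond the participant range, an accident
-- of wraparound; B sums the in-range T entries).
def Pre_solution (P : List Int) (T : List Int) (A : List Int) (B : List Int) : Prop :=
  P.length ≤ T.length ∧
  (∀ p ∈ A.zip B, (-(P.length : Int) ≤ p.1 ∧ p.1 < (P.length : Int)) ∧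
    (-(P.length : Int) ≤ p.2 ∧ p.2 < (P.length : Int))) ∧
  (T.length = P.length ∨ ∀ p ∈ A.zip B, 0 ≤ p.1 ∧ 0 ≤ p.2)
instance (P : List Int) (T : List Int) (A : List Int) (B : List Int) : Decidable (Pre_solution P T A B) := by unfold Pre_solution; infer_instance

def pvWitness_solution : List Int × List Int × List Int × List Int :=
  ([1, -1, 5, -5], [0, 0, 0, 0], [0, 2], [1, 3])

def Spec_solution (P : List Int) (T : List Int) (A : List Int) (B : List Int) (out : Bool) : Prop := out = solution_alt P T A B
instance (P : List Int) (T : List Int) (A : List Int) (B : List Int) (out : Bool) : Decidable (Spec_solution P T A B out) := by unfold Spec_solution; infer_instance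

-- ===== CLAIM (what is proved, stated in full; the proofs are below) =====
def Claim_equal_solution : Prop := ∀ (P : List Int) (T : List Int) (A : List Int) (B : List Int), Dom_solution P T A B → Pre_solution P T A B → Spec_solution P T A B (solution P T A B)

-- ===== LEMMAS AND PROOFS =====

-- `Vi w u`: node u is marked visited in array w; `pvE es u v`: u,v are the endpoints of some edge.
def Vi (w : List Bool) (u : Nat) : Bool := w.getD u false

-- Python's index semantics on a list of length N: a possibly negative index and its node
def pvIdx (N : Nat) (a : Int) : Nat := if 0 ≤ a then a.toNat else N - (-a).toNat

def pvInR (N : Nat) (a : Int) : Prop := -(N : Int) ≤ a ∧ a < (N : Int)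

def pvE (N : Nat) (es : List (Int × Int)) (u v : Nat) : Prop :=
  ∃ p ∈ es, (pvIdx N p.1 = u ∧ pvIdx N p.2 = v) ∨ (pvIdx N p.1 = v ∧ pvIdx N p.2 = u)

def pvConn (N : Nat) (es : List (Int × Int)) : Nat → Nat → Prop := Relation.EqvGen (pvE N es)

-- the per-class sum of P-T, keyed by a labelling function cg
def pvCsum (cg : Nat → Int) (x : Nat → Int) (N : Nat) (v : Nat) : Int :=
  (((List.range N).filter (fun u => cg u == cg v)).map x).sum

-- generic list helpers
theorem getD_set_eq {α : Type} (l : List α) (j u : Nat) (v d : α) :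
    (l.set j v).getD u d = if j = u ∧ j < l.length then v else l.getD u d := by
  simp only [List.getD_eq_getElem?_getD, List.getElem?_set]
  split_ifs with h1 h2 h3 h4 <;> simp_all; omega

theorem pvIdx_lt (N : Nat) (a : Int) (h : pvInR N a) : pvIdx N a < N := by
  obtain ⟨h1, h2⟩ := h
  unfold pvIdx
  split_ifs <;> omega

theorem pvIdx_natCast (N u : Nat) : pvIdx N (u : Int) = u := by
  simp [pvIdx]

theorem pyGetD_idx {α : Type} (xs : List α) (N : Nat) (a : Int) (d : α)
    (hlen : xs.length = N) (h1 : -(N : Int) ≤ a) (h2 : a < (N : Int)) :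
    PySem.List.pyGetD xs a d = xs.getD (pvIdx N a) d := by
  unfold PySem.List.pyGetD PySem.List.pyGet? PySem.List.pyIdx? pvIdx
  rw [hlen, List.getD_eq_getElem?_getD]
  split_ifs <;> simp_all

theorem pySetD_idx {α : Type} (xs : List α) (N : Nat) (a : Int) (v : α)
    (hlen : xs.length = N) (h1 : -(N : Int) ≤ a) (h2 : a < (N : Int)) :
    PySem.List.pySetD xs a v = xs.set (pvIdx N a) v := by
  unfold PySem.List.pySetD PySem.List.pySet? PySem.List.pyIdx? pvIdx
  rw [hlen]
  split_ifs <;> simp_all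

theorem count_false_set (l : List Bool) (u : Nat) (h : u < l.length) (hf : l.getD u false = false) :
    (l.set u true).count false + 1 = l.count false := by
  have hg : l[u] = false := by rwa [List.getD_eq_getElem l false h] at hf
  have := List.count_set (b := false) (a := true) (l := l) (i := u) h
  simp only [hg] at this
  have hpos : 0 < l.count false := by
    have hm : false ∈ l := by rw [← hg]; exact List.getElem_mem h
    exact List.count_pos_iff.mpr hm
  simp at this
  omega

theorem Vi_set (w : List Bool) (j u : Nat) :
    Vi (w.set j true) u = true ↔ ((j = u ∧ j < w.length) ∨ Vi w u = true) := by
  rw [Vi, getD_set_eq]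
  split_ifs with h
  · exact iff_of_true rfl (Or.inl h)
  · simp [Vi, h]

theorem Vi_set_mono (w : List Bool) (j u : Nat) (h : Vi w u = true) : Vi (w.set j true) u = true :=
  (Vi_set w j u).mpr (Or.inr h)

-- the inner neighbour loop: marks exactly the unvisited neighbours and appends them to the stack
theorem pushNbrs_spec (N : Nat) :
    ∀ (l : List Int) (visit : List Bool) (q : List Int),
    visit.length = N →
    (∀ a ∈ l, pvInR N a) →
    (pvPushNbrs visit q l).1.length = N ∧
    (∀ u : Nat, Vi visit u = true → Vi (pvPushNbrs visit q l).1 u = true) ∧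
    (∀ u : Nat, u < N → (Vi (pvPushNbrs visit q l).1 u = true ↔
        (Vi visit u = true ∨ ∃ a ∈ l, pvIdx N a = u))) ∧
    ∃ t, (pvPushNbrs visit q l).2 = q ++ t ∧ (t.map (pvIdx N)).Nodup ∧
       (∀ a ∈ t, a ∈ l ∧ pvInR N a) ∧
       (∀ u : Nat, ((∃ a ∈ t, pvIdx N a = u) ↔ ((∃ a ∈ l, pvIdx N a = u) ∧ Vi visit u = false))) ∧
       2 * (pvPushNbrs visit q l).1.count false + t.length ≤ 2 * visit.count false := by
  intro l
  induction l with
  | nil =>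
    intro visit q hlen _
    exact ⟨hlen, fun u h => h, fun u hu => by simp [pvPushNbrs], [], by simp [pvPushNbrs],
      by simp, by simp, by simp, by simp [pvPushNbrs]⟩
  | cons a l ih =>
    intro visit q hlen hb
    have ha := hb a List.mem_cons_self
    have haN : pvIdx N a < N := pvIdx_lt N a ha
    have hget : PySem.List.pyGetD visit a false = Vi visit (pvIdx N a) := by
      rw [pyGetD_idx visit N a false hlen ha.1 ha.2]; rfl
    have hstep : pvPushNbrs visit q (a :: l)
        = if Vi visit (pvIdx N a) then pvPushNbrs visit q l
          else pvPushNbrs (visit.set (pvIdx N a) true) (q ++ [a]) l := by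
      simp only [pvPushNbrs, List.foldl_cons, hget]
      split_ifs with h <;> simp [pySetD_idx visit N a true hlen ha.1 ha.2]
    by_cases hv : Vi visit (pvIdx N a) = true
    · rw [hstep, if_pos hv]
      obtain ⟨c1, c2, c3, t, ht1, ht2, ht3, ht4, ht5⟩ :=
        ih visit q hlen (fun b hbm => hb b (List.mem_cons_of_mem a hbm))
      refine ⟨c1, c2, fun u hu => ?_, t, ht1, ht2,
        (fun b hbm => ⟨List.mem_cons_of_mem a (ht3 b hbm).1, (ht3 b hbm).2⟩), fun u => ?_, ht5⟩
      · rw [c3 u hu]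
        constructor
        · rintro (h | ⟨b, hbm, hbe⟩)
          · exact Or.inl h
          · exact Or.inr ⟨b, List.mem_cons_of_mem a hbm, hbe⟩
        · rintro (h | ⟨b, hbm, hbe⟩)
          · exact Or.inl h
          · rcases List.mem_cons.mp hbm with rfl | hbm'
            · exact Or.inl (hbe ▸ hv)
            · exact Or.inr ⟨b, hbm', hbe⟩
      · rw [ht4 u]
        constructor
        · rintro ⟨⟨b, hbm, hbe⟩, h2⟩
          exact ⟨⟨b, List.mem_cons_of_mem a hbm, hbe⟩, h2⟩
        · rintro ⟨⟨b, hbm, hbe⟩, h2⟩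
          rcases List.mem_cons.mp hbm with rfl | hbm'
          · rw [hbe] at hv; rw [hv] at h2; cases h2
          · exact ⟨⟨b, hbm', hbe⟩, h2⟩
    · rw [hstep, if_neg hv]
      have hvf : Vi visit (pvIdx N a) = false := by simpa using hv
      have hlen' : (visit.set (pvIdx N a) true).length = N := by simpa using hlen
      obtain ⟨c1, c2, c3, t, ht1, ht2, ht3, ht4, ht5⟩ :=
        ih (visit.set (pvIdx N a) true) (q ++ [a]) hlen'
          (fun b hbm => hb b (List.mem_cons_of_mem a hbm))
      have hilen : pvIdx N a < visit.length := by omega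
      have hsetself : Vi (visit.set (pvIdx N a) true) (pvIdx N a) = true :=
        (Vi_set _ _ _).mpr (Or.inl ⟨rfl, hilen⟩)
      have hcount := count_false_set visit (pvIdx N a) hilen hvf
      refine ⟨c1, fun u h => c2 u (Vi_set_mono _ _ _ h), fun u hu => ?_,
        a :: t, by rw [ht1]; simp, ?_, ?_, fun u => ?_, by simp only [List.length_cons]; omega⟩
      · rw [c3 u hu]
        constructor
        · rintro (h | ⟨b, hbm, hbe⟩)
          · rcases (Vi_set visit _ u).mp h with ⟨heq, -⟩ | h1
            · exact Or.inr ⟨a, List.mem_cons_self, heq⟩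
            · exact Or.inl h1
          · exact Or.inr ⟨b, List.mem_cons_of_mem a hbm, hbe⟩
        · rintro (h | ⟨b, hbm, hbe⟩)
          · exact Or.inl ((Vi_set visit _ u).mpr (Or.inr h))
          · rcases List.mem_cons.mp hbm with rfl | hbm'
            · exact Or.inl ((Vi_set visit _ u).mpr (Or.inl ⟨hbe, hilen⟩))
            · exact Or.inr ⟨b, hbm', hbe⟩
      · simp only [List.map_cons]
        refine List.nodup_cons.mpr ⟨?_, ht2⟩
        intro hmem
        obtain ⟨b, hbm, hbe⟩ := List.mem_map.mp hmem
        have hthis := (ht4 (pvIdx N a)).mp ⟨b, hbm, hbe⟩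
        rw [hsetself] at hthis
        exact absurd hthis.2 (by simp)
      · intro b hbm
        rcases List.mem_cons.mp hbm with rfl | h
        · exact ⟨List.mem_cons_self, ha⟩
        · exact ⟨List.mem_cons_of_mem a (ht3 b h).1, (ht3 b h).2⟩
      · constructor
        · rintro ⟨b, hbm, hbe⟩
          rcases List.mem_cons.mp hbm with rfl | hbm'
          · exact ⟨⟨b, List.mem_cons_self, hbe⟩, hbe ▸ hvf⟩
          · obtain ⟨⟨c, hcm, hce⟩, hset⟩ := (ht4 u).mp ⟨b, hbm', hbe⟩
            refine ⟨⟨c, List.mem_cons_of_mem a hcm, hce⟩, ?_⟩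
            rcases Bool.eq_false_or_eq_true (Vi visit u) with h | h
            · rw [Vi_set_mono _ _ _ h] at hset; cases hset
            · exact h
        · rintro ⟨⟨b, hbm, hbe⟩, h2⟩
          rcases List.mem_cons.mp hbm with rfl | hbm'
          · exact ⟨b, List.mem_cons_self, hbe⟩
          · by_cases hua : u = pvIdx N a
            · exact ⟨a, List.mem_cons_self, hua.symm⟩
            · have hsetu : Vi (visit.set (pvIdx N a) true) u = false := by
                rcases Bool.eq_false_or_eq_true (Vi (visit.set (pvIdx N a) true) u) with hh | hh
                · rcases (Vi_set visit _ u).mp hh with ⟨h3, -⟩ | h3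
                  · exact absurd h3.symm hua
                  · rw [h3] at h2; cases h2
                · exact hh
              obtain ⟨c, hcm, hce⟩ := ((ht4 u).mpr ⟨⟨b, hbm', hbe⟩, hsetu⟩)
              exact ⟨c, List.mem_cons_of_mem a hcm, hce⟩

-- per-node value P[u]-T[u] and the sum over the newly visited nodes
def pvX (P T : List Int) (u : Nat) : Int := P.getD u 0 - T.getD u 0

def pvNewSum (P T : List Int) (N : Nat) (w1 w2 : List Bool) : Int :=
  (((List.range N).filter (fun u => Vi w2 u && !Vi w1 u)).map (pvX P T)).sum

theorem filter_sum_split (x : Nat → Int) (l : List Nat) (p r s : Nat → Bool)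
    (h : ∀ u ∈ l, (s u = (p u || r u)) ∧ ¬(p u = true ∧ r u = true)) :
    ((l.filter s).map x).sum = ((l.filter p).map x).sum + ((l.filter r).map x).sum := by
  induction l with
  | nil => simp
  | cons a l ih =>
    have ha := h a List.mem_cons_self
    have ih' := ih (fun u hu => h u (List.mem_cons_of_mem a hu))
    simp only [List.filter_cons]
    rcases Bool.eq_false_or_eq_true (p a) with hp | hp <;>
      rcases Bool.eq_false_or_eq_true (r a) with hr | hr
    · exact absurd ⟨hp, hr⟩ ha.2
    · have hs : s a = true := by rw [ha.1, hp, hr]; rfl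
      simp only [hs, hp, hr, Bool.false_eq_true, if_true, if_false, List.map_cons, List.sum_cons, ih']
      ring
    · have hs : s a = true := by rw [ha.1, hp, hr]; rfl
      simp only [hs, hp, hr, Bool.false_eq_true, if_true, if_false, List.map_cons, List.sum_cons, ih']
      ring
    · have hs : s a = false := by rw [ha.1, hp, hr]; rfl
      simp only [hs, hp, hr, Bool.false_eq_true, if_false, ih']

theorem sum_over_mem_filter (x : Nat → Int) (N : Nat) (t : List Int)
    (hnd : (t.map (pvIdx N)).Nodup) (hb : ∀ a ∈ t, pvInR N a) :
    (((List.range N).filter (fun (u : Nat) => decide (∃ a ∈ t, pvIdx N a = u))).map x).sum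
      = (t.map (fun a => x (pvIdx N a))).sum := by
  have hperm : ((List.range N).filter (fun (u : Nat) => decide (∃ a ∈ t, pvIdx N a = u))).Perm
      (t.map (pvIdx N)) := by
    refine (List.perm_ext_iff_of_nodup ?_ ?_).mpr ?_
    · exact (List.nodup_range).filter _
    · exact hnd
    · intro u
      simp only [List.mem_filter, List.mem_range, List.mem_map, decide_eq_true_eq]
      constructor
      · rintro ⟨h1, h2⟩; exact h2
      · rintro ⟨a, hha, hau⟩
        exact ⟨hau ▸ pvIdx_lt N a (hb a hha), ⟨a, hha, hau⟩⟩
  calc (((List.range N).filter (fun (u : Nat) => decide (∃ a ∈ t, pvIdx N a = u))).map x).sum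
      = ((t.map (pvIdx N)).map x).sum := (hperm.map x).sum_eq
    _ = (t.map (fun a => x (pvIdx N a))).sum := by rw [List.map_map]; rfl

theorem range_count_one (N i : Nat) (h : i < N) : (List.range N).count i = 1 := by
  have hnd := List.nodup_range (n := N)
  rw [List.count_eq_one_of_mem] <;> simp [*]

theorem sum_filter_eq_single (x : Nat → Int) (N i : Nat) (h : i < N) :
    (((List.range N).filter (fun u => u == i)).map x).sum = x i := by
  rw [List.filter_beq, range_count_one N i h]
  simp

-- the while loop: visits exactly the stack's connected components and accumulates their P-T sum
theorem dfs_spec (P T : List Int) (adj : List (List Int)) (N : Nat) (es : List (Int × Int))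
    (hadjlen : adj.length = N)
    (hadj : ∀ u : Nat, u < N → ∀ c ∈ adj.getD u [], pvInR N c ∧ pvConn N es u (pvIdx N c) ∧
      (PySem.List.pyGetD P c 0 - PySem.List.pyGetD T c 0 = pvX P T (pvIdx N c))) :
    ∀ (fuel : Nat) (visit : List Bool) (q : List Int) (s : Int),
    visit.length = N →
    (q.map (pvIdx N)).Nodup →
    (∀ a ∈ q, pvInR N a ∧ Vi visit (pvIdx N a) = true ∧
      (PySem.List.pyGetD P a 0 - PySem.List.pyGetD T a 0 = pvX P T (pvIdx N a))) →
    (∀ u : Nat, u < N → Vi visit u = true →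
        (∃ a ∈ q, pvIdx N a = u) ∨ ∀ c ∈ adj.getD u [], Vi visit (pvIdx N c) = true) →
    2 * visit.count false + q.length ≤ fuel →
    (pvDfs P T adj fuel visit q s).1.length = N ∧
    (∀ u : Nat, Vi visit u = true → Vi (pvDfs P T adj fuel visit q s).1 u = true) ∧
    (∀ u : Nat, u < N → Vi (pvDfs P T adj fuel visit q s).1 u = true →
        Vi visit u = true ∨ ∃ a ∈ q, pvConn N es (pvIdx N a) u) ∧
    (∀ u : Nat, u < N → Vi (pvDfs P T adj fuel visit q s).1 u = true →
        ∀ c ∈ adj.getD u [], Vi (pvDfs P T adj fuel visit q s).1 (pvIdx N c) = true) ∧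
    (pvDfs P T adj fuel visit q s).2
      = s + pvNewSum P T N visit (pvDfs P T adj fuel visit q s).1
          + (q.map (fun a => pvX P T (pvIdx N a))).sum := by
  intro fuel
  induction fuel with
  | zero =>
    intro visit q s hlen hnd hq hcl hfuel
    match q, hfuel with
    | [], _ =>
      refine ⟨hlen, fun u h => h, fun u _ h => Or.inl h, fun u hu hv c hc => ?_, ?_⟩
      · rcases hcl u hu hv with ⟨a, ha, -⟩ | h
        · cases ha
        · exact h c hc
      · simp [pvDfs, pvNewSum]
    | a :: t, hfuel => simp only [List.length_cons] at hfuel; omega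
  | succ fuel ih =>
    intro visit q s hlen hnd hq hcl hfuel
    match q with
    | [] =>
      refine ⟨hlen, fun u h => h, fun u _ h => Or.inl h, fun u hu hv c hc => ?_, ?_⟩
      · rcases hcl u hu hv with ⟨a, ha, -⟩ | h
        · cases ha
        · exact h c hc
      · simp [pvDfs, pvNewSum]
    | a :: t =>
      set v : Int := (a :: t).getLast (List.cons_ne_nil a t) with hvdef
      set q1 : List Int := (a :: t).dropLast with hq1def
      set l : List Int := PySem.List.pyGetD adj v [] with hldef
      set push := pvPushNbrs visit q1 l with hpushdef
      have hred : pvDfs P T adj (fuel + 1) visit (a :: t) s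
          = pvDfs P T adj fuel push.1 push.2
              (s + PySem.List.pyGetD P v 0 - PySem.List.pyGetD T v 0) := rfl
      have hvmem : v ∈ a :: t := List.getLast_mem _
      obtain ⟨hvR, hvvis, hvOK⟩ := hq v hvmem
      have hvN : pvIdx N v < N := pvIdx_lt N v hvR
      have hleq : l = adj.getD (pvIdx N v) [] := by
        rw [hldef]; exact pyGetD_idx adj N v [] hadjlen hvR.1 hvR.2
      have hlb : ∀ c ∈ l, pvInR N c := by
        intro c hc
        rw [hleq] at hc
        exact (hadj (pvIdx N v) hvN c hc).1
      obtain ⟨c1, c2, c3, t', ht1, ht2, ht3, ht4, ht5⟩ := pushNbrs_spec N l visit q1 hlen hlb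
      rw [← hpushdef] at c1 c2 c3 ht1 ht5
      have hsplit : a :: t = q1 ++ [v] := (List.dropLast_append_getLast _).symm
      have hndapp : ((q1 ++ [v]).map (pvIdx N)).Nodup := by rw [← hsplit]; exact hnd
      rw [List.map_append] at hndapp
      obtain ⟨hnd1, -, hdisj1⟩ := List.nodup_append.mp hndapp
      have hq1sub : ∀ b ∈ q1, b ∈ a :: t := by
        intro b hb; rw [hsplit]; exact List.mem_append_left _ hb
      have hndnew : (push.2.map (pvIdx N)).Nodup := by
        rw [ht1, List.map_append]
        refine List.nodup_append.mpr ⟨hnd1, ht2, ?_⟩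
        intro x hx1 y hy2 heq
        subst heq
        obtain ⟨b, hb1, rfl⟩ := List.mem_map.mp hx1
        obtain ⟨c, hc2, hcb⟩ := List.mem_map.mp hy2
        obtain ⟨-, bvis, -⟩ := hq b (hq1sub b hb1)
        have hmem := (ht4 (pvIdx N b)).mp ⟨c, hc2, hcb⟩
        rw [hmem.2] at bvis; cases bvis
      have hqnew : ∀ b ∈ push.2, pvInR N b ∧ Vi push.1 (pvIdx N b) = true ∧
          (PySem.List.pyGetD P b 0 - PySem.List.pyGetD T b 0 = pvX P T (pvIdx N b)) := by
        intro b hb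
        rw [ht1] at hb
        rcases List.mem_append.mp hb with hb1 | hb2
        · obtain ⟨bR, bvis, bOK⟩ := hq b (hq1sub b hb1)
          exact ⟨bR, c2 _ bvis, bOK⟩
        · have hbl := ht3 b hb2
          have hbl' : b ∈ adj.getD (pvIdx N v) [] := by rw [← hleq]; exact hbl.1
          exact ⟨hbl.2, (c3 (pvIdx N b) (pvIdx_lt N b hbl.2)).mpr (Or.inr ⟨b, hbl.1, rfl⟩),
            (hadj (pvIdx N v) hvN b hbl').2.2⟩
      have hclnew : ∀ u : Nat, u < N → Vi push.1 u = true →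
          (∃ b ∈ push.2, pvIdx N b = u) ∨ ∀ c ∈ adj.getD u [], Vi push.1 (pvIdx N c) = true := by
        intro u hu hvu
        by_cases hvis : Vi visit u = true
        · rcases hcl u hu hvis with ⟨b, hbm, hbe⟩ | hclosed
          · rw [hsplit] at hbm
            rcases List.mem_append.mp hbm with h1 | h1
            · exact Or.inl ⟨b, by rw [ht1]; exact List.mem_append_left _ h1, hbe⟩
            · have hbv : b = v := List.mem_singleton.mp h1
              subst hbv
              right
              intro c hc
              rw [← hbe, ← hleq] at hc
              exact (c3 (pvIdx N c) (pvIdx_lt N c (hlb c hc))).mpr (Or.inr ⟨c, hc, rfl⟩)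
          · exact Or.inr (fun c hc => c2 _ (hclosed c hc))
        · have hvisf : Vi visit u = false := by simpa using hvis
          have hinl : ∃ b ∈ l, pvIdx N b = u := by
            rcases (c3 u hu).mp hvu with h | h
            · exact absurd h hvis
            · exact h
          obtain ⟨b, hbm, hbe⟩ := (ht4 u).mpr ⟨hinl, hvisf⟩
          exact Or.inl ⟨b, by rw [ht1]; exact List.mem_append_right _ hbm, hbe⟩
      have hfuel' : 2 * push.1.count false + push.2.length ≤ fuel := by
        have hlq1 : q1.length + 1 = (a :: t).length := by
          rw [hq1def, List.length_dropLast]; simp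
        rw [ht1, List.length_append]
        simp only [List.length_cons] at hfuel hlq1
        omega
      obtain ⟨d1, d2, d3, d4, d5⟩ := ih push.1 push.2
        (s + PySem.List.pyGetD P v 0 - PySem.List.pyGetD T v 0) c1 hndnew hqnew hclnew hfuel'
      have hconn_of_l : ∀ c : Int, c ∈ l → pvConn N es (pvIdx N v) (pvIdx N c) := by
        intro c hc
        rw [hleq] at hc
        exact (hadj (pvIdx N v) hvN c hc).2.1
      rw [hred]
      refine ⟨d1, fun u h => d2 u (c2 u h), ?_, d4, ?_⟩
      · intro u hu hfin
        rcases d3 u hu hfin with hpush | ⟨b, hbmem, hbconn⟩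
        · rcases (c3 u hu).mp hpush with hold | ⟨b, hbm, hbe⟩
          · exact Or.inl hold
          · exact Or.inr ⟨v, hvmem, hbe ▸ hconn_of_l b hbm⟩
        · rw [ht1] at hbmem
          rcases List.mem_append.mp hbmem with hb1 | hb2
          · exact Or.inr ⟨b, hq1sub b hb1, hbconn⟩
          · have hbl := ht3 b hb2
            exact Or.inr ⟨v, hvmem, Relation.EqvGen.trans _ _ _ (hconn_of_l b hbl.1) hbconn⟩
      · set fin := pvDfs P T adj fuel push.1 push.2
          (s + PySem.List.pyGetD P v 0 - PySem.List.pyGetD T v 0) with hfindef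
        have hsq : ((a :: t).map (fun b => pvX P T (pvIdx N b))).sum
            = (q1.map (fun b => pvX P T (pvIdx N b))).sum + pvX P T (pvIdx N v) := by
          rw [hsplit]; simp
        have hsq2 : (push.2.map (fun b => pvX P T (pvIdx N b))).sum
            = (q1.map (fun b => pvX P T (pvIdx N b))).sum + (t'.map (fun b => pvX P T (pvIdx N b))).sum := by
          rw [ht1]; simp
        have hpoint : ∀ u ∈ List.range N,
            ((Vi fin.1 u && !Vi visit u) = ((Vi fin.1 u && !Vi push.1 u) || (Vi push.1 u && !Vi visit u)))
            ∧ ¬((Vi fin.1 u && !Vi push.1 u) = true ∧ (Vi push.1 u && !Vi visit u) = true) := by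
          intro u _
          have m1 := c2 u
          have m2 := d2 u
          rcases Bool.eq_false_or_eq_true (Vi visit u) with h1 | h1 <;>
            rcases Bool.eq_false_or_eq_true (Vi push.1 u) with h2 | h2 <;>
            rcases Bool.eq_false_or_eq_true (Vi fin.1 u) with h3 | h3
          · simp [h1, h2, h3]
          · exact absurd (m2 h2) (by rw [h3]; simp)
          · exact absurd (m1 h1) (by rw [h2]; simp)
          · exact absurd (m1 h1) (by rw [h2]; simp)
          · simp [h1, h2, h3]
          · exact absurd (m2 h2) (by rw [h3]; simp)
          · simp [h1, h2, h3]
          · simp [h1, h2, h3]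
        have hsplitSum := filter_sum_split (pvX P T) (List.range N)
          (fun u => Vi fin.1 u && !Vi push.1 u) (fun u => Vi push.1 u && !Vi visit u)
          (fun u => Vi fin.1 u && !Vi visit u) hpoint
        have hrcongr : (List.range N).filter (fun u => Vi push.1 u && !Vi visit u)
            = (List.range N).filter (fun (u : Nat) => decide (∃ b ∈ t', pvIdx N b = u)) := by
          refine List.filter_congr ?_
          intro u hu
          have huN : u < N := List.mem_range.mp hu
          rcases Bool.eq_false_or_eq_true (Vi visit u) with h1 | h1
          · have hnot : ¬ (∃ b ∈ t', pvIdx N b = u) := by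
              rintro ⟨b, hbm, hbe⟩
              have := ((ht4 u).mp ⟨b, hbm, hbe⟩).2
              rw [h1] at this; cases this
            simp [h1, hnot]
          · rcases Bool.eq_false_or_eq_true (Vi push.1 u) with h2 | h2
            · have hmem : ∃ b ∈ t', pvIdx N b = u :=
                (ht4 u).mpr ⟨((c3 u huN).mp h2).resolve_left (by simp [h1]), h1⟩
              simp [h1, h2, hmem]
            · have hnot : ¬ (∃ b ∈ t', pvIdx N b = u) := by
                rintro ⟨b, hbm, hbe⟩
                have hl' := ((ht4 u).mp ⟨b, hbm, hbe⟩).1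
                have := (c3 u huN).mpr (Or.inr hl')
                rw [h2] at this; cases this
              simp [h1, h2, hnot]
        have hnewsplit : pvNewSum P T N visit fin.1
            = pvNewSum P T N push.1 fin.1 + (t'.map (fun b => pvX P T (pvIdx N b))).sum := by
          rw [pvNewSum, hsplitSum, pvNewSum, hrcongr,
            sum_over_mem_filter (pvX P T) N t' ht2 (fun b hbm => (ht3 b hbm).2)]
        rw [d5, hnewsplit, hsq, hsq2, ← hvOK]
        ring

-- a visit array closed under the adjacency lists is closed under connectivity
theorem conn_closed (es : List (Int × Int)) (N : Nat) (adj : List (List Int)) (w : List Bool)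
    (hEadj : ∀ u v : Nat, u < N → pvE N es u v → ((∃ c ∈ adj.getD u [], pvIdx N c = v) ∧ v < N))
    (hcl : ∀ u : Nat, u < N → Vi w u = true → ∀ c ∈ adj.getD u [], Vi w (pvIdx N c) = true) :
    ∀ u v : Nat, pvConn N es u v → ((u < N ∧ Vi w u = true) ↔ (v < N ∧ Vi w v = true)) := by
  intro u v h
  induction h with
  | rel a b hab =>
    constructor
    · rintro ⟨haN, hav⟩
      obtain ⟨⟨c, hcm, hce⟩, hbN⟩ := hEadj a b haN hab
      exact ⟨hbN, hce ▸ hcl a haN hav c hcm⟩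
    · rintro ⟨hbN, hbv⟩
      have hba : pvE N es b a := by
        obtain ⟨p, hp, hc⟩ := hab
        exact ⟨p, hp, hc.symm⟩
      obtain ⟨⟨c, hcm, hce⟩, haN⟩ := hEadj b a hbN hba
      exact ⟨haN, hce ▸ hcl b hbN hbv c hcm⟩
  | refl a => exact Iff.rfl
  | symm a b _ ihab => exact ihab.symm
  | trans a b c _ _ ih1 ih2 => exact ih1.trans ih2

theorem buildAdj_length (ab : List (Int × Int)) : ∀ (acc : List (List Int)),
    (pvBuildAdj ab acc).length = acc.length := by
  induction ab with
  | nil => intro acc; rfl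
  | cons p ab ih =>
    intro acc
    show (pvBuildAdj ab _).length = _
    rw [ih]
    simp [PySem.List.length_pySetD]

theorem buildAdj_mem (N : Nat) : ∀ (ab : List (Int × Int)) (acc : List (List Int)),
    acc.length = N →
    (∀ p ∈ ab, pvInR N p.1 ∧ pvInR N p.2) →
    ∀ (u : Nat), u < N → ∀ (c : Int),
    (c ∈ (pvBuildAdj ab acc).getD u [] ↔
      c ∈ acc.getD u [] ∨ ∃ p ∈ ab, (pvIdx N p.1 = u ∧ p.2 = c) ∨ (pvIdx N p.2 = u ∧ p.1 = c)) := by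
  intro ab
  induction ab with
  | nil => intro acc _ _ u _ c; simp [pvBuildAdj]
  | cons p ab ih =>
    intro acc hlen hb u hu c
    have hp := hb p List.mem_cons_self
    set acc1 := PySem.List.pySetD acc p.1 (PySem.List.pyGetD acc p.1 [] ++ [p.2]) with hacc1
    set acc2 := PySem.List.pySetD acc1 p.2 (PySem.List.pyGetD acc1 p.2 [] ++ [p.1]) with hacc2
    have hstep : pvBuildAdj (p :: ab) acc = pvBuildAdj ab acc2 := rfl
    have hlen1 : acc1.length = N := by rw [hacc1, PySem.List.length_pySetD, hlen]
    have hlen2 : acc2.length = N := by rw [hacc2, PySem.List.length_pySetD, hlen1]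
    have gacc1 : ∀ w : Nat, w < N →
        acc1.getD w [] = (if pvIdx N p.1 = w then acc.getD w [] ++ [p.2] else acc.getD w []) := by
      intro w hw
      rw [hacc1, pySetD_idx acc N p.1 _ hlen hp.1.1 hp.1.2, pyGetD_idx acc N p.1 [] hlen hp.1.1 hp.1.2,
        getD_set_eq]
      by_cases hc1 : pvIdx N p.1 = w
      · rw [if_pos ⟨hc1, by omega⟩, if_pos hc1, hc1]
      · rw [if_neg (fun h => hc1 h.1), if_neg hc1]
    have gacc2 : ∀ w : Nat, w < N →
        acc2.getD w [] = (if pvIdx N p.2 = w then acc1.getD w [] ++ [p.1] else acc1.getD w []) := by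
      intro w hw
      rw [hacc2, pySetD_idx acc1 N p.2 _ hlen1 hp.2.1 hp.2.2, pyGetD_idx acc1 N p.2 [] hlen1 hp.2.1 hp.2.2,
        getD_set_eq]
      by_cases hc1 : pvIdx N p.2 = w
      · rw [if_pos ⟨hc1, by omega⟩, if_pos hc1, hc1]
      · rw [if_neg (fun h => hc1 h.1), if_neg hc1]
    have hmem2 : c ∈ acc2.getD u [] ↔
        c ∈ acc.getD u [] ∨ (pvIdx N p.1 = u ∧ p.2 = c) ∨ (pvIdx N p.2 = u ∧ p.1 = c) := by
      rw [gacc2 u hu, gacc1 u hu]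
      by_cases hc1 : pvIdx N p.1 = u <;> by_cases hc2 : pvIdx N p.2 = u <;>
        simp [hc1, hc2, List.mem_append, eq_comm]
    rw [hstep, ih acc2 hlen2 (fun r hr => hb r (List.mem_cons_of_mem p hr)) u hu c, hmem2]
    simp only [List.mem_cons]
    constructor
    · rintro ((h | h) | ⟨r, hr, hh⟩)
      · exact Or.inl h
      · exact Or.inr ⟨p, Or.inl rfl, h⟩
      · exact Or.inr ⟨r, Or.inr hr, hh⟩
    · rintro (h | ⟨r, (rfl | hr), hh⟩)
      · exact Or.inl (Or.inl h)
      · exact Or.inl (Or.inr hh)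
      · exact Or.inr ⟨r, hr, hh⟩

theorem getD_replicate_nil (N u : Nat) : (List.replicate N ([] : List Int)).getD u [] = [] := by
  simp [List.getD]

-- the outer for-loop with early return
theorem outer_spec (P T : List Int) (adj : List (List Int)) (es : List (Int × Int)) (cg : Nat → Int)
    (N : Nat) (hNP : N = P.length)
    (hadjlen : adj.length = N)
    (hadj : ∀ u : Nat, u < N → ∀ c ∈ adj.getD u [], pvInR N c ∧ pvConn N es u (pvIdx N c) ∧
      (PySem.List.pyGetD P c 0 - PySem.List.pyGetD T c 0 = pvX P T (pvIdx N c)))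
    (hEadj : ∀ u v : Nat, u < N → pvE N es u v → ((∃ c ∈ adj.getD u [], pvIdx N c = v) ∧ v < N))
    (hcg : ∀ u v : Nat, u < N → v < N → (cg u = cg v ↔ pvConn N es u v)) :
    ∀ (k i : Nat) (visit : List Bool), i + k = N →
    visit.length = N →
    (∀ u : Nat, u < N → Vi visit u = true → ∀ c ∈ adj.getD u [], Vi visit (pvIdx N c) = true) →
    (∀ u : Nat, u < N → Vi visit u = true → pvCsum cg (pvX P T) N u = 0) →
    (pvOuter P T adj (PySem.List.pyRange (i : Int) (N : Int) 1) visit = true ↔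
      ∀ u : Nat, i ≤ u → u < N → pvCsum cg (pvX P T) N u = 0) := by
  intro k
  induction k with
  | zero =>
    intro i visit hik hlen hclosed hzero
    have hi : i = N := by omega
    subst hi
    rw [PySem.List.pyRange_one_eq_nil (le_refl _)]
    exact iff_of_true rfl (fun u h1 h2 => absurd h2 (by omega))
  | succ k ih =>
    intro i visit hik hlen hclosed hzero
    have hiN : i < N := by omega
    have hcons : PySem.List.pyRange (i : Int) (N : Int) 1 = (i : Int) :: PySem.List.pyRange ((i : Int) + 1) (N : Int) 1 :=
      PySem.List.pyRange_one_cons (by exact_mod_cast hiN)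
    have hcast : ((i : Int) + 1) = ((i + 1 : Nat) : Int) := by push_cast; ring
    have hva : PySem.List.pyGetD visit (i : Int) false = Vi visit i := PySem.List.pyGetD_natCast visit i false
    rw [hcons]
    by_cases hvis : Vi visit i = true
    · have hrw : pvOuter P T adj ((i : Int) :: PySem.List.pyRange ((i : Int) + 1) (N : Int) 1) visit
          = pvOuter P T adj (PySem.List.pyRange ((i : Int) + 1) (N : Int) 1) visit := by
        show (if PySem.List.pyGetD visit (i : Int) false then _ else _) = _
        rw [hva, hvis, if_pos rfl]
      rw [hrw, hcast, ih (i + 1) visit (by omega) hlen hclosed hzero]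
      constructor
      · intro h u h1 h2
        by_cases hui : u = i
        · subst hui; exact hzero u h2 hvis
        · exact h u (by omega) h2
      · intro h u h1 h2
        exact h u (by omega) h2
    · have hvisf : Vi visit i = false := by simpa using hvis
      have hset : PySem.List.pySetD visit (i : Int) true = visit.set i true := by
        simp
      set visit1 := visit.set i true with hv1
      set r := pvDfs P T adj (2 * P.length + 1) visit1 [(i : Int)] 0 with hr
      have hrw : pvOuter P T adj ((i : Int) :: PySem.List.pyRange ((i : Int) + 1) (N : Int) 1) visit
          = (if r.2 ≠ 0 then false else pvOuter P T adj (PySem.List.pyRange ((i : Int) + 1) (N : Int) 1) r.1) := by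
        show (if PySem.List.pyGetD visit (i : Int) false then _ else _) = _
        rw [hva, hvisf, if_neg (by simp), hset]
      have hlen1 : visit1.length = N := by rw [hv1, List.length_set, hlen]
      have hilen : i < visit.length := by omega
      have hVi1i : Vi visit1 i = true := (Vi_set visit i i).mpr (Or.inl ⟨rfl, hilen⟩)
      obtain ⟨d1, d2, d3, d4, d5⟩ := dfs_spec P T adj N es hadjlen hadj (2 * P.length + 1) visit1 [(i : Int)] 0
        hlen1 (by simp)
        (by
          intro b hb
          rw [List.mem_singleton] at hb
          subst hb
          refine ⟨⟨by omega, by exact_mod_cast hiN⟩, ?_, ?_⟩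
          · rw [pvIdx_natCast]; exact hVi1i
          · rw [pvIdx_natCast, PySem.List.pyGetD_natCast, PySem.List.pyGetD_natCast]; rfl)
        (by
          intro u hu hv1u
          rcases (Vi_set visit i u).mp hv1u with ⟨heq, -⟩ | hold
          · subst heq
            exact Or.inl ⟨(i : Int), List.mem_singleton.mpr rfl, pvIdx_natCast N i⟩
          · exact Or.inr (fun c hc => Vi_set_mono _ _ _ (hclosed u hu hold c hc)))
        (by
          have := List.count_le_length (l := visit1) (a := false)
          simp only [List.length_singleton]
          omega)
      rw [← hr] at d1 d2 d3 d4 d5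
      have hccF := conn_closed es N adj r.1 hEadj d4
      have hccV := conn_closed es N adj visit hEadj hclosed
      have hVri : Vi r.1 i = true := d2 i hVi1i
      -- the component sum of i equals the dfs result
      have hfiltconn : (List.range N).filter (fun u => cg u == cg i)
          = (List.range N).filter (fun u => Vi r.1 u && !Vi visit u) := by
        refine List.filter_congr ?_
        intro u hu
        have huN : u < N := List.mem_range.mp hu
        by_cases hcgu : cg u = cg i
        · have hconn : pvConn N es u i := (hcg u i huN hiN).mp hcgu
          have hVru : Vi r.1 u = true := ((hccF u i hconn).mpr ⟨hiN, hVri⟩).2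
          have hVvu : Vi visit u = false := by
            rcases Bool.eq_false_or_eq_true (Vi visit u) with h | h
            · have := ((hccV u i hconn).mp ⟨huN, h⟩).2
              rw [this] at hvisf; cases hvisf
            · exact h
          simp [hcgu, hVru, hVvu]
        · have hne1 : ¬(Vi r.1 u = true ∧ Vi visit u = false) := by
            rintro ⟨hVru, hVvu⟩
            rcases d3 u huN hVru with h | ⟨b, hbm, hbc⟩
            · rcases (Vi_set visit i u).mp h with ⟨heq, -⟩ | hold
              · exact hcgu (by rw [heq])
              · rw [hold] at hVvu; cases hVvu
            · rw [List.mem_singleton] at hbm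
              subst hbm
              have hconn : pvConn N es i u := by rw [← pvIdx_natCast N i]; exact hbc
              exact hcgu ((hcg u i huN hiN).mpr (Relation.EqvGen.symm _ _ hconn))
          have hne : (Vi r.1 u && !Vi visit u) = false := by
            by_cases h1 : Vi r.1 u = true
            · by_cases h2 : Vi visit u = true
              · simp [h1, h2]
              · exact absurd ⟨h1, by simpa using h2⟩ hne1
            · simp [(by simpa using h1 : Vi r.1 u = false)]
          simp [hcgu, hne]
      have hsplitS := filter_sum_split (pvX P T) (List.range N)
        (fun u => Vi r.1 u && !Vi visit1 u) (fun u => u == i)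
        (fun u => Vi r.1 u && !Vi visit u)
        (by
          intro u hu
          by_cases hui : u = i
          · subst hui
            simp [hVri, hVi1i, hvisf]
          · have hv1u : Vi visit1 u = Vi visit u := by
              rcases Bool.eq_false_or_eq_true (Vi visit u) with h | h
              · rw [h]; exact (Vi_set visit i u).mpr (Or.inr h)
              · rw [h]
                rcases Bool.eq_false_or_eq_true (Vi visit1 u) with h' | h'
                · rcases (Vi_set visit i u).mp h' with ⟨heq, -⟩ | hold
                  · exact absurd heq.symm hui
                  · rw [hold] at h; cases h
                · exact h'
            simp [hv1u, hui])
      have hsum : r.2 = pvCsum cg (pvX P T) N i := by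
        have hxi : ([(i : Int)].map (fun b => pvX P T (pvIdx N b))).sum = pvX P T i := by
          simp [pvIdx_natCast]
        rw [pvCsum, hfiltconn, pvNewSum] at *
        rw [d5, hsplitS, sum_filter_eq_single (pvX P T) N i hiN, hxi]
        ring
      by_cases hz : r.2 = 0
      · rw [hrw, if_neg (by simpa using hz), hcast]
        have hclosed' := d4
        have hzero' : ∀ u : Nat, u < N → Vi r.1 u = true → pvCsum cg (pvX P T) N u = 0 := by
          intro u hu hVru
          rcases d3 u hu hVru with h | ⟨b, hbm, hbc⟩
          · rcases (Vi_set visit i u).mp h with ⟨heq, -⟩ | hold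
            · subst heq; rw [← hsum]; exact hz
            · exact hzero u hu hold
          · rw [List.mem_singleton] at hbm
            subst hbm
            have hconn : pvConn N es i u := by rw [← pvIdx_natCast N i]; exact hbc
            have hcgeq : cg u = cg i := (hcg u i hu hiN).mpr (Relation.EqvGen.symm _ _ hconn)
            have hcsumeq : pvCsum cg (pvX P T) N u = pvCsum cg (pvX P T) N i := by
              rw [pvCsum, pvCsum, hcgeq]
            rw [hcsumeq, ← hsum]; exact hz
        rw [ih (i + 1) r.1 (by omega) d1 hclosed' hzero']
        constructor
        · intro h u h1 h2
          by_cases hui : u = i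
          · subst hui; rw [← hsum]; exact hz
          · exact h u (by omega) h2
        · intro h u h1 h2
          exact h u (by omega) h2
      · rw [hrw, if_pos (by simpa using hz)]
        constructor
        · intro h; cases h
        · intro h
          exact absurd (hsum ▸ h i (le_refl i) hiN) hz

-- ==== B side ====
-- the label function of a component array: entries inside [0,N), distinct sentinels outside
def pvCg (N : Nat) (comp : List Int) (u : Nat) : Int :=
  if u < N then comp.getD u 0 else -(u : Int) - 1

-- one edge-merge step exactly as in solution_alt
def pvMerge : List Int → (Int × Int) → List Int := fun comp p =>
  let ca := PySem.List.pyGetD comp p.1 0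
  let cb := PySem.List.pyGetD comp p.2 0
  if ca ≠ cb then comp.map (fun c => if c = cb then ca else c) else comp

theorem eqvGen_congr {r s : Nat → Nat → Prop} (h : ∀ a b, r a b ↔ s a b) :
    ∀ u v, Relation.EqvGen r u v ↔ Relation.EqvGen s u v :=
  fun _ _ => ⟨Relation.EqvGen.mono (fun a b hh => (h a b).mp hh),
    Relation.EqvGen.mono (fun a b hh => (h a b).mpr hh)⟩

theorem eqvGen_or_eqvGen {S T : Nat → Nat → Prop} : ∀ u v : Nat,
    Relation.EqvGen (fun a b => S a b ∨ Relation.EqvGen T a b) u v ↔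
      Relation.EqvGen (fun a b => S a b ∨ T a b) u v := by
  intro u v
  constructor
  · intro h
    induction h with
    | rel a b hab =>
      rcases hab with h | h
      · exact Relation.EqvGen.rel _ _ (Or.inl h)
      · exact Relation.EqvGen.mono (fun x y hh => Or.inr hh) h
    | refl a => exact Relation.EqvGen.refl a
    | symm a b _ ih => exact Relation.EqvGen.symm _ _ ih
    | trans a b c _ _ ih1 ih2 => exact Relation.EqvGen.trans _ _ _ ih1 ih2
  · exact Relation.EqvGen.mono (fun a b hh => hh.imp id (Relation.EqvGen.rel _ _))

theorem eqvGen_or_eq {S : Nat → Nat → Prop} : ∀ u v : Nat,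
    Relation.EqvGen (fun a b => S a b ∨ a = b) u v ↔ Relation.EqvGen S u v := by
  intro u v
  constructor
  · intro h
    induction h with
    | rel a b hab =>
      rcases hab with h | h
      · exact Relation.EqvGen.rel _ _ h
      · subst h; exact Relation.EqvGen.refl a
    | refl a => exact Relation.EqvGen.refl a
    | symm a b _ ih => exact Relation.EqvGen.symm _ _ ih
    | trans a b c _ _ ih1 ih2 => exact Relation.EqvGen.trans _ _ _ ih1 ih2
  · exact Relation.EqvGen.mono (fun a b hh => Or.inl hh)

-- substituting one label by another merges exactly the two classes
theorem subst_classes (K : Nat → Int) (a' b' : Nat) : ∀ u v : Nat,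
    ((if K u = K b' then K a' else K u) = (if K v = K b' then K a' else K v)) ↔
    Relation.EqvGen (fun s t => ((s = a' ∧ t = b') ∨ (s = b' ∧ t = a')) ∨ K s = K t) u v := by
  intro u v
  constructor
  · intro h
    by_cases hu : K u = K b' <;> by_cases hv : K v = K b'
    · exact Relation.EqvGen.rel _ _ (Or.inr (hu.trans hv.symm))
    · rw [if_pos hu, if_neg hv] at h
      exact Relation.EqvGen.trans _ _ _ (Relation.EqvGen.rel _ _ (Or.inr hu))
        (Relation.EqvGen.trans _ _ _ (Relation.EqvGen.rel _ _ (Or.inl (Or.inr ⟨rfl, rfl⟩)))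
          (Relation.EqvGen.rel _ _ (Or.inr h)))
    · rw [if_neg hu, if_pos hv] at h
      exact Relation.EqvGen.trans _ _ _ (Relation.EqvGen.rel _ _ (Or.inr h))
        (Relation.EqvGen.trans _ _ _ (Relation.EqvGen.rel _ _ (Or.inl (Or.inl ⟨rfl, rfl⟩)))
          (Relation.EqvGen.rel _ _ (Or.inr hv.symm)))
    · rw [if_neg hu, if_neg hv] at h
      exact Relation.EqvGen.rel _ _ (Or.inr h)
  · intro h
    induction h with
    | rel s t hst =>
      rcases hst with (⟨hs, ht⟩ | ⟨hs, ht⟩) | hKeq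
      · rw [hs, ht]; by_cases hab : K a' = K b' <;> simp [hab]
      · rw [hs, ht]; by_cases hab : K a' = K b' <;> simp [hab]
      · rw [hKeq]
    | refl a => rfl
    | symm a b _ ih => exact ih.symm
    | trans a b c _ _ ih1 ih2 => exact ih1.trans ih2

theorem pvE_cons (N : Nat) (p : Int × Int) (es : List (Int × Int)) (a b : Nat) :
    pvE N (p :: es) a b ↔
      (((a = pvIdx N p.1 ∧ b = pvIdx N p.2) ∨ (a = pvIdx N p.2 ∧ b = pvIdx N p.1)) ∨ pvE N es a b) := by
  constructor
  · rintro ⟨q, hq, hc⟩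
    rcases List.mem_cons.mp hq with rfl | hq
    · rcases hc with ⟨h1, h2⟩ | ⟨h1, h2⟩
      · exact Or.inl (Or.inl ⟨h1.symm, h2.symm⟩)
      · exact Or.inl (Or.inr ⟨h2.symm, h1.symm⟩)
    · exact Or.inr ⟨q, hq, hc⟩
  · rintro ((⟨h1, h2⟩ | ⟨h1, h2⟩) | ⟨q, hq, hc⟩)
    · exact ⟨p, List.mem_cons_self, Or.inl ⟨h1.symm, h2.symm⟩⟩
    · exact ⟨p, List.mem_cons_self, Or.inr ⟨h2.symm, h1.symm⟩⟩
    · exact ⟨q, List.mem_cons_of_mem p hq, hc⟩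

theorem merge_pointwise (N : Nat) (comp : List Int) (p : Int × Int)
    (hlen : comp.length = N) (hent : ∀ u : Nat, u < N → 0 ≤ comp.getD u 0)
    (hp : pvInR N p.1 ∧ pvInR N p.2) :
    (∀ u : Nat, pvCg N (pvMerge comp p) u
      = (if pvCg N comp u = pvCg N comp (pvIdx N p.2) then pvCg N comp (pvIdx N p.1) else pvCg N comp u))
    ∧ (pvMerge comp p).length = N
    ∧ (∀ u : Nat, u < N → 0 ≤ (pvMerge comp p).getD u 0) := by
  have ha1 : pvIdx N p.1 < N := pvIdx_lt N p.1 hp.1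
  have ha2 : pvIdx N p.2 < N := pvIdx_lt N p.2 hp.2
  have hca : PySem.List.pyGetD comp p.1 0 = pvCg N comp (pvIdx N p.1) := by
    rw [pyGetD_idx comp N p.1 0 hlen hp.1.1 hp.1.2, pvCg, if_pos ha1]
  have hcb : PySem.List.pyGetD comp p.2 0 = pvCg N comp (pvIdx N p.2) := by
    rw [pyGetD_idx comp N p.2 0 hlen hp.2.1 hp.2.2, pvCg, if_pos ha2]
  by_cases hcc : PySem.List.pyGetD comp p.1 0 = PySem.List.pyGetD comp p.2 0
  · have hmerge : pvMerge comp p = comp := by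
      rw [pvMerge]
      simp [hcc]
    rw [hmerge]
    refine ⟨fun u => ?_, hlen, hent⟩
    rw [← hca, ← hcb, ← hcc]
    by_cases hKu : pvCg N comp u = PySem.List.pyGetD comp p.1 0
    · rw [if_pos hKu, hKu]
    · rw [if_neg hKu]
  · have hmerge : pvMerge comp p
        = comp.map (fun c => if c = PySem.List.pyGetD comp p.2 0 then PySem.List.pyGetD comp p.1 0 else c) := by
      rw [pvMerge]
      simp [hcc]
    have hmap : ∀ u : Nat, u < N → (pvMerge comp p).getD u 0
        = (if comp.getD u 0 = PySem.List.pyGetD comp p.2 0 then PySem.List.pyGetD comp p.1 0 else comp.getD u 0) := by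
      intro u hu
      have hu' : u < comp.length := by omega
      rw [hmerge]
      rw [List.getD_eq_getElem _ _ (by simpa using hu'), List.getElem_map,
        List.getD_eq_getElem _ _ hu']
    refine ⟨fun u => ?_, by rw [hmerge]; simpa using hlen, fun u hu => ?_⟩
    · by_cases hu : u < N
      · rw [pvCg, if_pos hu, hmap u hu, pvCg, if_pos hu, hca, hcb]
      · have hneg : pvCg N (pvMerge comp p) u = -(u : Int) - 1 := by rw [pvCg, if_neg hu]
        have hneg' : pvCg N comp u = -(u : Int) - 1 := by rw [pvCg, if_neg hu]
        rw [hneg, hneg', ← hcb]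
        have hne : ¬(-(u : Int) - 1 = PySem.List.pyGetD comp p.2 0) := by
          rw [pyGetD_idx comp N p.2 0 hlen hp.2.1 hp.2.2]
          have h1 := hent (pvIdx N p.2) ha2
          have h2 : comp.getD (pvIdx N p.2) 0 = comp.getD (pvIdx N p.2) 0 := rfl
          omega
        rw [if_neg hne]
    · rw [hmap u hu]
      split_ifs with h
      · rw [pyGetD_idx comp N p.1 0 hlen hp.1.1 hp.1.2]
        exact hent (pvIdx N p.1) ha1
      · exact hent u hu

theorem merge_fold (N : Nat) : ∀ (es : List (Int × Int)) (comp : List Int),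
    comp.length = N → (∀ u : Nat, u < N → 0 ≤ comp.getD u 0) →
    (∀ p ∈ es, pvInR N p.1 ∧ pvInR N p.2) →
    (es.foldl pvMerge comp).length = N ∧
    (∀ u : Nat, u < N → 0 ≤ (es.foldl pvMerge comp).getD u 0) ∧
    (∀ u v : Nat, pvCg N (es.foldl pvMerge comp) u = pvCg N (es.foldl pvMerge comp) v ↔
      Relation.EqvGen (fun a b => pvE N es a b ∨ pvCg N comp a = pvCg N comp b) u v) := by
  intro es
  induction es with
  | nil =>
    intro comp hlen hent _
    refine ⟨hlen, hent, fun u v => ?_⟩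
    simp only [List.foldl_nil]
    rw [eqvGen_congr (s := fun a b => pvCg N comp a = pvCg N comp b)
      (fun a b => by simp [pvE]) u v]
    rw [Equivalence.eqvGen_iff (r := fun a b : Nat => pvCg N comp a = pvCg N comp b)
      ⟨fun a => rfl, fun h => h.symm, fun h1 h2 => h1.trans h2⟩]
  | cons p es ih =>
    intro comp hlen hent hb
    have hp := hb p List.mem_cons_self
    obtain ⟨hpt, hlen', hent'⟩ := merge_pointwise N comp p hlen hent hp
    obtain ⟨f1, f2, f3⟩ := ih (pvMerge comp p) hlen' hent'
      (fun q hq => hb q (List.mem_cons_of_mem p hq))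
    simp only [List.foldl_cons]
    refine ⟨f1, f2, fun u v => ?_⟩
    rw [f3 u v]
    have hK' : ∀ a b : Nat, (pvCg N (pvMerge comp p) a = pvCg N (pvMerge comp p) b) ↔
        Relation.EqvGen (fun s t =>
          ((s = pvIdx N p.1 ∧ t = pvIdx N p.2) ∨ (s = pvIdx N p.2 ∧ t = pvIdx N p.1)) ∨
            pvCg N comp s = pvCg N comp t) a b := by
      intro a b
      rw [hpt a, hpt b]
      exact subst_classes (pvCg N comp) (pvIdx N p.1) (pvIdx N p.2) a b
    rw [eqvGen_congr (s := fun a b => pvE N es a b ∨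
        Relation.EqvGen (fun s t =>
          ((s = pvIdx N p.1 ∧ t = pvIdx N p.2) ∨ (s = pvIdx N p.2 ∧ t = pvIdx N p.1)) ∨
            pvCg N comp s = pvCg N comp t) a b)
      (fun a b => by rw [hK' a b]) u v]
    rw [eqvGen_or_eqvGen u v]
    exact eqvGen_congr (fun a b => by rw [pvE_cons N p es a b]; tauto) u v

-- the accumulation dict: each key holds the sum of its group's values
theorem getD_fold_insert_add (key fv : Int → Int) : ∀ (l : List Int) (d : PySem.Dict Int Int) (c : Int),
    (l.foldl (fun d v => d.insert (key v) (d.getD (key v) 0 + fv v)) d).getD c 0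
      = d.getD c 0 + ((l.filter (fun v => key v == c)).map fv).sum := by
  intro l
  induction l with
  | nil => intro d c; simp
  | cons a l ih =>
    intro d c
    simp only [List.foldl_cons, List.filter_cons]
    rw [ih]
    by_cases hc : key a = c
    · rw [PySem.Dict.getD_insert, if_pos hc.symm]
      simp only [hc, BEq.rfl, if_true, List.map_cons, List.sum_cons]
      ring
    · rw [PySem.Dict.getD_insert, if_neg (fun h => hc h.symm)]
      simp only [beq_iff_eq, hc, if_false]

theorem b_tail (key fv : Int → Int) (N : Nat) (x : Nat → Int)
    (hkx : ∀ u : Nat, u < N → fv ((u : Nat) : Int) = x u) :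
    (((PySem.List.pyRange 0 (N : Int) 1).foldl (fun d v =>
        d.insert (key v) (d.getD (key v) 0 + fv v)) (PySem.Dict.empty : PySem.Dict Int Int)).values.all
      (fun s => s == 0) = true) ↔
    (∀ v : Nat, v < N →
      (((List.range N).filter (fun (u : Nat) => key (u : Int) == key (v : Int))).map x).sum = 0) := by
  set l := PySem.List.pyRange 0 (N : Int) 1 with hldef
  have hl : l = (List.range N).map (fun k => ((k : Nat) : Int)) := by
    rw [hldef, PySem.List.pyRange_one]
    simp
  have hnd := PySem.Dict.nodup_keys_foldl_insert_key l key
    (fun d v => d.getD (key v) 0 + fv v) PySem.Dict.empty (by simp [PySem.Dict.keys_empty])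
  have hkeys := PySem.Dict.keys_foldl_insert_key (ν := Int) l key
    (fun d v => d.getD (key v) 0 + fv v) PySem.Dict.empty
  have hgetD : ∀ c : Int,
      (l.foldl (fun d v => d.insert (key v) (d.getD (key v) 0 + fv v)) PySem.Dict.empty).getD c 0
        = (((List.range N).filter (fun (u : Nat) => key (u : Int) == c)).map x).sum := by
    intro c
    rw [getD_fold_insert_add key fv l PySem.Dict.empty c, PySem.Dict.getD_empty, zero_add]
    rw [hl, List.filter_map, List.map_map]
    refine congrArg List.sum (List.map_congr_left ?_)
    intro u hu
    have huN : u < N := List.mem_range.mp (List.mem_filter.mp hu).1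
    simp [hkx u huN]
  have hmemkeys : ∀ c : Int,
      (c ∈ (l.foldl (fun d v => d.insert (key v) (d.getD (key v) 0 + fv v)) PySem.Dict.empty).keys
        ↔ ∃ v : Nat, v < N ∧ key ((v : Nat) : Int) = c) := by
    intro c
    rw [hkeys, PySem.Dict.keys_empty]
    show c ∈ PySem.Set.ofList (l.map key) ↔ _
    rw [PySem.Set.mem_ofList]
    simp [hl]
  rw [PySem.Dict.values_eq_map_keys _ hnd 0]
  simp only [List.all_eq_true, List.mem_map]
  constructor
  · intro h v hv
    have h1 := h _ ⟨key ((v : Nat) : Int), (hmemkeys _).mpr ⟨v, hv, rfl⟩, rfl⟩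
    rw [beq_iff_eq, hgetD] at h1
    exact h1
  · rintro h s ⟨c, hc, rfl⟩
    obtain ⟨v, hv, rfl⟩ := (hmemkeys c).mp hc
    rw [beq_iff_eq, hgetD]
    exact h v hv

-- ===== VERDICT (by name: the statement is the Claim_ definition above) =====
theorem solution_spec : Claim_equal_solution := by
  unfold Claim_equal_solution
  intro P T A B _ hpre
  unfold Spec_solution
  obtain ⟨hTlen, hAB0, hTneg⟩ := hpre
  set N := P.length with hN
  set es := A.zip B with hes
  have hAB : ∀ p ∈ es, pvInR N p.1 ∧ pvInR N p.2 := by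
    intro p hp
    exact ⟨⟨(hAB0 p hp).1.1, (hAB0 p hp).1.2⟩, ⟨(hAB0 p hp).2.1, (hAB0 p hp).2.2⟩⟩
  -- P-T lookups agree with the normalised node on every edge endpoint
  have hOKedge : ∀ p ∈ es,
      (PySem.List.pyGetD P p.1 0 - PySem.List.pyGetD T p.1 0 = pvX P T (pvIdx N p.1)) ∧
      (PySem.List.pyGetD P p.2 0 - PySem.List.pyGetD T p.2 0 = pvX P T (pvIdx N p.2)) := by
    rcases hTneg with hTN | hpos
    · intro p hp
      have h1 := hAB p hp
      constructor
      · rw [pyGetD_idx P N p.1 0 rfl h1.1.1 h1.1.2, pyGetD_idx T N p.1 0 (by omega) h1.1.1 h1.1.2]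
        rfl
      · rw [pyGetD_idx P N p.2 0 rfl h1.2.1 h1.2.2, pyGetD_idx T N p.2 0 (by omega) h1.2.1 h1.2.2]
        rfl
    · intro p hp
      have h1 := hpos p hp
      constructor
      · rw [PySem.List.pyGetD_of_nonneg P 0 h1.1, PySem.List.pyGetD_of_nonneg T 0 h1.1,
          pvIdx, if_pos h1.1]
        rfl
      · rw [PySem.List.pyGetD_of_nonneg P 0 h1.2, PySem.List.pyGetD_of_nonneg T 0 h1.2,
          pvIdx, if_pos h1.2]
        rfl
  -- B side: the final component labelling and its characterisation
  have hlen0 : (PySem.List.pyRange 0 (N : Int) 1).length = N := by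
    rw [PySem.List.length_pyRange_one]; omega
  have hget0 : ∀ u : Nat, u < N → (PySem.List.pyRange 0 (N : Int) 1).getD u 0 = (u : Int) := by
    intro u hu
    rw [PySem.List.pyRange_one]
    have hNN : ((N : Int) - 0).toNat = N := by omega
    rw [hNN, PySem.List.getD_map_range _ _ _ _ hu]
    simp
  have hent0 : ∀ u : Nat, u < N → 0 ≤ (PySem.List.pyRange 0 (N : Int) 1).getD u 0 := by
    intro u hu; rw [hget0 u hu]; exact Int.natCast_nonneg u
  obtain ⟨g1, g2, g3⟩ := merge_fold N es (PySem.List.pyRange 0 (N : Int) 1) hlen0 hent0 hAB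
  set F := es.foldl pvMerge (PySem.List.pyRange 0 (N : Int) 1) with hF
  set cg : Nat → Int := fun u => F.getD u 0 with hcg0
  have hcgF : ∀ u : Nat, u < N → pvCg N F u = cg u := by
    intro u hu; rw [pvCg, if_pos hu]
  have hinj0 : ∀ a b : Nat,
      (pvCg N (PySem.List.pyRange 0 (N : Int) 1) a = pvCg N (PySem.List.pyRange 0 (N : Int) 1) b ↔ a = b) := by
    intro a b
    constructor
    · intro h
      rw [pvCg, pvCg] at h
      by_cases haN : a < N <;> by_cases hbN : b < N
      · rw [if_pos haN, if_pos hbN, hget0 a haN, hget0 b hbN] at h; exact_mod_cast h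
      · rw [if_pos haN, if_neg hbN, hget0 a haN] at h; omega
      · rw [if_neg haN, if_pos hbN, hget0 b hbN] at h; omega
      · rw [if_neg haN, if_neg hbN] at h; omega
    · rintro rfl; rfl
  have hconnF : ∀ u v : Nat, u < N → v < N → (cg u = cg v ↔ pvConn N es u v) := by
    intro u v hu hv
    rw [← hcgF u hu, ← hcgF v hv, g3 u v]
    rw [eqvGen_congr (s := fun a b => pvE N es a b ∨ a = b)
      (fun a b => by rw [hinj0 a b]) u v]
    exact eqvGen_or_eq u v
  -- A side: the adjacency lists
  set adj := pvBuildAdj es (List.replicate N []) with hadjdef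
  have hadjlen : adj.length = N := by
    rw [hadjdef, buildAdj_length]; simp
  have hchar : ∀ u : Nat, u < N → ∀ c : Int,
      (c ∈ adj.getD u [] ↔ ∃ p ∈ es, (pvIdx N p.1 = u ∧ p.2 = c) ∨ (pvIdx N p.2 = u ∧ p.1 = c)) := by
    intro u hu c
    rw [hadjdef, buildAdj_mem N es (List.replicate N []) (by simp) hAB u hu c, getD_replicate_nil]
    simp
  have hadjH : ∀ u : Nat, u < N → ∀ c ∈ adj.getD u [], pvInR N c ∧ pvConn N es u (pvIdx N c) ∧
      (PySem.List.pyGetD P c 0 - PySem.List.pyGetD T c 0 = pvX P T (pvIdx N c)) := by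
    intro u hu c hc
    obtain ⟨p, hp, hcase⟩ := (hchar u hu c).mp hc
    rcases hcase with ⟨h1, h2⟩ | ⟨h1, h2⟩
    · subst h2
      exact ⟨(hAB p hp).2, Relation.EqvGen.rel _ _ ⟨p, hp, Or.inl ⟨h1, rfl⟩⟩, (hOKedge p hp).2⟩
    · subst h2
      exact ⟨(hAB p hp).1, Relation.EqvGen.rel _ _ ⟨p, hp, Or.inr ⟨rfl, h1⟩⟩, (hOKedge p hp).1⟩
  have hEadjH : ∀ u v : Nat, u < N → pvE N es u v → ((∃ c ∈ adj.getD u [], pvIdx N c = v) ∧ v < N) := by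
    intro u v hu hE
    obtain ⟨p, hp, hc⟩ := hE
    rcases hc with ⟨h1, h2⟩ | ⟨h1, h2⟩
    · exact ⟨⟨p.2, (hchar u hu _).mpr ⟨p, hp, Or.inl ⟨h1, rfl⟩⟩, h2⟩, h2 ▸ pvIdx_lt N p.2 (hAB p hp).2⟩
    · exact ⟨⟨p.1, (hchar u hu _).mpr ⟨p, hp, Or.inr ⟨h2, rfl⟩⟩, h1⟩, h1 ▸ pvIdx_lt N p.1 (hAB p hp).1⟩
  have hrepl : ∀ u : Nat, Vi (List.replicate N false) u = false := by
    intro u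
    rw [Vi]
    simp [List.getD]
  -- A = true iff every class sums to zero
  have h0 := outer_spec P T adj es cg N hN hadjlen hadjH hEadjH hconnF N 0 (List.replicate N false)
    (by omega) (by simp)
    (fun u hu hvis => by rw [hrepl] at hvis; cases hvis)
    (fun u hu hvis => by rw [hrepl] at hvis; cases hvis)
  rw [Nat.cast_zero] at h0
  have hsolA : solution P T A B = pvOuter P T adj (PySem.List.pyRange 0 (N : Int) 1) (List.replicate N false) := rfl
  have hAiff : (solution P T A B = true) ↔ (∀ u : Nat, u < N → pvCsum cg (pvX P T) N u = 0) := by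
    rw [hsolA, h0]
    exact ⟨fun h u hu => h u (Nat.zero_le u) hu, fun h u _ hu => h u hu⟩
  -- B = true iff every class sums to zero
  have hsolB : solution_alt P T A B
      = ((PySem.List.pyRange 0 (N : Int) 1).foldl (fun d v =>
          d.insert (PySem.List.pyGetD F v 0)
            (d.getD (PySem.List.pyGetD F v 0) 0 + PySem.List.pyGetD P v 0 - PySem.List.pyGetD T v 0))
        PySem.Dict.empty).values.all (fun s => s == 0) := rfl
  have hfeq : (fun (d : PySem.Dict Int Int) (v : Int) =>
        d.insert (PySem.List.pyGetD F v 0)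
          (d.getD (PySem.List.pyGetD F v 0) 0 + PySem.List.pyGetD P v 0 - PySem.List.pyGetD T v 0))
      = (fun d v => d.insert ((fun w => PySem.List.pyGetD F w 0) v)
          (d.getD ((fun w => PySem.List.pyGetD F w 0) v) 0
            + (fun w => PySem.List.pyGetD P w 0 - PySem.List.pyGetD T w 0) v)) := by
    funext d v
    simp only []
    rw [add_sub_assoc]
  have hBiff : (solution_alt P T A B = true) ↔ (∀ u : Nat, u < N → pvCsum cg (pvX P T) N u = 0) := by
    rw [hsolB, hfeq]
    rw [b_tail (fun w => PySem.List.pyGetD F w 0) (fun w => PySem.List.pyGetD P w 0 - PySem.List.pyGetD T w 0)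
      N (pvX P T)
      (fun u hu => by simp only [PySem.List.pyGetD_natCast]; rfl)]
    have hpt : ∀ v : Nat,
        (((List.range N).filter (fun (u : Nat) => (fun w => PySem.List.pyGetD F w 0) (u : Int)
            == (fun w => PySem.List.pyGetD F w 0) (v : Int))).map (pvX P T)).sum
          = pvCsum cg (pvX P T) N v := by
      intro v
      rw [pvCsum]
      have hpred : (fun u : Nat => (fun w => PySem.List.pyGetD F w 0) (u : Int)
          == (fun w => PySem.List.pyGetD F w 0) (v : Int)) = (fun u => cg u == cg v) := by
        funext u
        simp only [PySem.List.pyGetD_natCast]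
        rfl
      rw [hpred]
    constructor
    · intro h v hv; rw [← hpt v]; exact h v hv
    · intro h v hv; rw [hpt v]; exact h v hv
  rcases Bool.eq_false_or_eq_true (solution P T A B) with hA | hA <;>
    rcases Bool.eq_false_or_eq_true (solution_alt P T A B) with hB | hB
  · rw [hA, hB]
  · exact absurd (hBiff.mpr (hAiff.mp hA)) (by rw [hB]; simp)
  · exact absurd (hAiff.mpr (hBiff.mp hB)) (by rw [hA]; simp)
  · rw [hA, hB]
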